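-- pv_equiv track=rewrite | github.com/dailyworker-news/DWnews | projects/DWnews/backend/agents/enhanced_journalist_agent.py | _parse_article_text
-- ===== SOURCE A (Python) =====
-- from typing import Dict, List, Any, Optional, Tuple
--
-- def _parse_article_text(article_text: str) -> Tuple[str, str]:
--     """Parse article text to extract title and body"""
--     lines = article_text.strip().split('\n')
--
--     # Find title (first non-empty line, often starts with # in markdown)
--     title = ""
--     body_start = 0
--
--     for i, line in enumerate(lines):
--         line = line.strip()
--         if line:
--             # Remove markdown heading markers
--             title = line.lstrip('#').strip()
--             body_start = i + 1
--             break
--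
--     # Body is everything after title
--     body = '\n'.join(lines[body_start:]).strip()
--
--     return title, body
-- ===== SOURCE B (Python) =====
-- def _parse_article_text(article_text: str):
--     """Parse article text to extract title and body (partition-based, no scan loop)."""
--     stripped = article_text.strip()
--     head, _, rest = stripped.partition('\n')
--     return head.lstrip('#').strip(), rest.strip()
-- ===== Notes on version B (the rewrite author's own statement) =====
-- stated objective: simpler
-- what changed: Replaces the split-into-lines + indexed scan-for-first-non-empty-line loop + slice-and-rejoin with a single partition at the first newline of the stripped text, relying on strip() guaranteeing the first line is non-empty.
import Mathlib
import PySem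

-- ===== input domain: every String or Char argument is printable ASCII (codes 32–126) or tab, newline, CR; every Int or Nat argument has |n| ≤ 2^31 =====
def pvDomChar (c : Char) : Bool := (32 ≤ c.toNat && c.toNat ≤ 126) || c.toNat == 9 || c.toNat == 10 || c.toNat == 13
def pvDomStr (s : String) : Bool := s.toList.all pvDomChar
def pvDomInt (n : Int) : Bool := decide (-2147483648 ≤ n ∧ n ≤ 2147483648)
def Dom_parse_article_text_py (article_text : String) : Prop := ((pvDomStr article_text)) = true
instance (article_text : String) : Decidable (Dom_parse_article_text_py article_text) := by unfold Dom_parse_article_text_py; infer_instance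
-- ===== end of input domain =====

-- B replaces A's split-into-lines + indexed scan-for-first-non-empty-line loop + slice-and-rejoin
-- by a single partition of the stripped text at its first newline (simpler decomposition).

-- ===== PORT A =====
-- str.lstrip('#'): drop the leading '#' characters (exact: single-character strip set)
def pvLstripHashA (s : List Char) : List Char := s.dropWhile (· == '#')

-- the 'for i, line in enumerate(lines)' scan: first line with truthy strip() gives (title, i+1)
def pvLoopA : List (List Char) → Nat → Option (List Char × Nat)
  | [], _ => none
  | line :: rest, i =>
      let l := PySem.Chars.strip line
      if l ≠ [] then some (PySem.Chars.strip (pvLstripHashA l), i + 1)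
      else pvLoopA rest (i + 1)

def parse_article_text_py (article_text : String) : String × String :=
  let lines := PySem.Chars.splitOn (PySem.Chars.strip article_text.toList) ['\n']
  let tb := (pvLoopA lines 0).getD ([], 0)   -- (title, body_start); defaults kept if no break
  let body := PySem.Chars.strip
      (PySem.Chars.join ['\n'] (PySem.List.slice lines (some (tb.2 : Int)) none))
  (String.ofList tb.1, String.ofList body)

-- ===== PORT B =====
def parse_article_text_py_alt (article_text : String) : String × String :=
  let stripped := PySem.Chars.strip article_text.toList
  let head := stripped.takeWhile (· != '\n')            -- partition('\n').0 (single-char sep: exact)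
  let rest := (stripped.dropWhile (· != '\n')).drop 1   -- partition('\n').2 ('' when no newline)
  (String.ofList (PySem.Chars.strip (head.dropWhile (· == '#'))),
   String.ofList (PySem.Chars.strip rest))

-- ===== PRECONDITION & SPEC =====
def Spec_parse_article_text_py (article_text : String) (out : String × String) : Prop := out = parse_article_text_py_alt article_text
instance (article_text : String) (out : String × String) : Decidable (Spec_parse_article_text_py article_text out) := by unfold Spec_parse_article_text_py; infer_instance

-- ===== CLAIM (what is proved, stated in full; the proofs are below) =====
def Claim_equal_parse_article_text_py : Prop := ∀ (article_text : String), Dom_parse_article_text_py article_text → Spec_parse_article_text_py article_text (parse_article_text_py article_text)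

-- ===== LEMMAS AND PROOFS =====

-- generic: the head of a dropWhile result fails the predicate
lemma pv_dropWhile_head_false {p : Char → Bool} {l : List Char} {c : Char} {m : List Char}
    (h : l.dropWhile p = c :: m) : p c = false := by
  induction l with
  | nil => simp at h
  | cons a t ih =>
    rw [List.dropWhile_cons] at h
    by_cases hp : p a
    · simp [hp] at h; exact ih h
    · simp [hp] at h; rcases h with ⟨h1, _⟩; subst h1; simpa using hp

lemma pv_rstrip_eq_nil_iff (m : List Char) :
    PySem.Chars.rstrip m = [] ↔ ∀ c ∈ m, PySem.Chars.isspace c = true := by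
  simp [PySem.Chars.rstrip, List.dropWhile_eq_nil_iff]

lemma pv_lstrip_eq_nil_of_all (m : List Char)
    (h : ∀ c ∈ m, PySem.Chars.isspace c = true) : PySem.Chars.lstrip m = [] := by
  simp [PySem.Chars.lstrip, List.dropWhile_eq_nil_iff]; exact fun c hc => h c hc

lemma pv_lstrip_cons (c : Char) (m : List Char) :
    PySem.Chars.lstrip (c :: m)
      = if PySem.Chars.isspace c then PySem.Chars.lstrip m else c :: m := by
  simp [PySem.Chars.lstrip, List.dropWhile_cons]

lemma pv_rstrip_cons (c : Char) (m : List Char) :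
    PySem.Chars.rstrip (c :: m)
      = if PySem.Chars.rstrip m = [] then (if PySem.Chars.isspace c then [] else [c])
        else c :: PySem.Chars.rstrip m := by
  unfold PySem.Chars.rstrip
  rw [List.reverse_cons, List.dropWhile_append]
  by_cases h : List.dropWhile PySem.Chars.isspace m.reverse = []
  · by_cases hc : PySem.Chars.isspace c <;>
      simp [h, hc, List.dropWhile_cons]
  · simp [h, List.isEmpty_iff]

lemma pv_rstrip_append (xs ys : List Char) :
    PySem.Chars.rstrip (xs ++ ys)
      = if PySem.Chars.rstrip ys = [] then PySem.Chars.rstrip xs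
        else xs ++ PySem.Chars.rstrip ys := by
  unfold PySem.Chars.rstrip
  rw [List.reverse_append, List.dropWhile_append]
  by_cases h : List.dropWhile PySem.Chars.isspace ys.reverse = []
  · simp [h]
  · simp [h, List.isEmpty_iff]

lemma pv_rstrip_prefix (m : List Char) : PySem.Chars.rstrip m <+: m := by
  obtain ⟨t, ht⟩ := List.dropWhile_suffix (p := PySem.Chars.isspace) (l := m.reverse)
  exact ⟨t.reverse, by
    simpa [PySem.Chars.rstrip, List.reverse_append] using congrArg List.reverse ht⟩

lemma pv_rstrip_idem (m : List Char) :
    PySem.Chars.rstrip (PySem.Chars.rstrip m) = PySem.Chars.rstrip m := by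
  unfold PySem.Chars.rstrip
  rw [List.reverse_reverse]
  cases h : List.dropWhile PySem.Chars.isspace m.reverse with
  | nil => simp
  | cons a t =>
    have ha := pv_dropWhile_head_false h
    rw [List.dropWhile_cons, ha]
    simp

lemma pv_lstrip_rstrip_comm (m : List Char) :
    PySem.Chars.lstrip (PySem.Chars.rstrip m) = PySem.Chars.rstrip (PySem.Chars.lstrip m) := by
  induction m with
  | nil => rfl
  | cons c r ih =>
    rw [pv_rstrip_cons, pv_lstrip_cons]
    by_cases hc : PySem.Chars.isspace c
    · by_cases hr : PySem.Chars.rstrip r = []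
      · have h1 : PySem.Chars.lstrip r = [] :=
          pv_lstrip_eq_nil_of_all r ((pv_rstrip_eq_nil_iff r).mp hr)
        rw [if_pos hr, if_pos hc, if_pos hc, h1]
        rfl
      · rw [if_neg hr, if_pos hc, pv_lstrip_cons, if_pos hc, ih]
    · by_cases hr : PySem.Chars.rstrip r = []
      · rw [if_pos hr, if_neg hc, if_neg hc, pv_lstrip_cons, if_neg hc,
            pv_rstrip_cons, if_pos hr, if_neg hc]
      · rw [if_neg hr, if_neg hc, pv_lstrip_cons, if_neg hc,
            pv_rstrip_cons, if_neg hr]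

lemma pv_strip_rstrip (m : List Char) :
    PySem.Chars.strip (PySem.Chars.rstrip m) = PySem.Chars.strip m := by
  show PySem.Chars.rstrip (PySem.Chars.lstrip (PySem.Chars.rstrip m)) = _
  rw [pv_lstrip_rstrip_comm, pv_rstrip_idem]; rfl

lemma pv_rstrip_eq_self_of_all_false (l : List Char)
    (h : ∀ c ∈ l, PySem.Chars.isspace c = false) : PySem.Chars.rstrip l = l := by
  unfold PySem.Chars.rstrip
  cases hrev : l.reverse with
  | nil => simpa using congrArg List.reverse hrev
  | cons a t =>
    have ha : PySem.Chars.isspace a = false := by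
      apply h
      have : a ∈ l.reverse := by rw [hrev]; exact List.mem_cons_self
      simpa using this
    have h2 := congrArg List.reverse hrev
    rw [List.reverse_reverse] at h2
    rw [List.dropWhile_cons, ha]
    simp only [Bool.false_eq_true, if_false]
    exact h2.symm

-- a string's strip is empty or begins with a non-whitespace character
lemma pv_strip_shape (l : List Char) :
    PySem.Chars.strip l = [] ∨
    ∃ c m, PySem.Chars.strip l = c :: m ∧ PySem.Chars.isspace c = false := by
  have hs : PySem.Chars.strip l = PySem.Chars.rstrip (PySem.Chars.lstrip l) := rfl
  cases hl : PySem.Chars.lstrip l with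
  | nil => left; rw [hs, hl]; rfl
  | cons c m =>
    have hc : PySem.Chars.isspace c = false := pv_dropWhile_head_false hl
    rw [hs, hl, pv_rstrip_cons, hc]
    by_cases hr : PySem.Chars.rstrip m = []
    · right; exact ⟨c, [], by rw [if_pos hr]; simp, hc⟩
    · right; exact ⟨c, PySem.Chars.rstrip m, by rw [if_neg hr], hc⟩

-- title equality: rstripping before lstrip('#') cannot change the final stripped title
lemma pv_title_eq (x : List Char) :
    PySem.Chars.strip ((PySem.Chars.rstrip x).dropWhile (· == '#'))
      = PySem.Chars.strip (x.dropWhile (· == '#')) := by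
  have hx := List.takeWhile_append_dropWhile (p := (· == '#')) (l := x)
  have hall : ∀ c ∈ x.takeWhile (· == '#'), (c == '#') = true :=
    fun c hc => List.mem_takeWhile_imp (p := (· == '#')) hc
  have hns : ∀ c ∈ x.takeWhile (· == '#'), PySem.Chars.isspace c = false := by
    intro c hc
    have : c = '#' := by simpa using hall c hc
    rw [this]; decide
  have hdw : (x.takeWhile (· == '#')).dropWhile (· == '#') = [] :=
    List.dropWhile_eq_nil_iff.mpr (fun c hc => hall c hc)
  by_cases hr : PySem.Chars.rstrip (x.dropWhile (· == '#')) = []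
  · conv_lhs => rw [← hx]
    rw [pv_rstrip_append, if_pos hr,
        pv_rstrip_eq_self_of_all_false _ hns, hdw]
    have hms : PySem.Chars.lstrip (x.dropWhile (· == '#')) = [] :=
      pv_lstrip_eq_nil_of_all _ ((pv_rstrip_eq_nil_iff _).mp hr)
    show PySem.Chars.strip [] = PySem.Chars.rstrip (PySem.Chars.lstrip _)
    rw [hms]; rfl
  · conv_lhs => rw [← hx]
    rw [pv_rstrip_append, if_neg hr, List.dropWhile_append, hdw]
    simp only [List.isEmpty_nil, if_true]
    obtain ⟨t, ht⟩ := pv_rstrip_prefix (x.dropWhile (· == '#'))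
    cases hrm : PySem.Chars.rstrip (x.dropWhile (· == '#')) with
    | nil => exact absurd hrm hr
    | cons hd tl =>
      have hm' : x.dropWhile (· == '#') = hd :: (tl ++ t) := by
        rw [← ht, hrm]; simp
      have hhd : (hd == '#') = false := pv_dropWhile_head_false (p := (· == '#')) hm'
      rw [List.dropWhile_cons, hhd]
      simp only [Bool.false_eq_true, if_false]
      rw [← hrm, pv_strip_rstrip]

-- ---- split('\n') characterised by a simple structural recursion ----
def pvSplitNL : List Char → List (List Char)
  | [] => [[]]
  | c :: r =>
      if c == '\n' then [] :: pvSplitNL r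
      else
        match pvSplitNL r with
        | x :: xs => (c :: x) :: xs
        | [] => [[c]]

lemma pvSplitNL_ne_nil (l : List Char) : pvSplitNL l ≠ [] := by
  cases l with
  | nil => simp [pvSplitNL]
  | cons c r =>
    by_cases hc : c == '\n' <;> simp [pvSplitNL, hc] <;> cases h : pvSplitNL r <;> simp

lemma pv_go_spec (fuel : Nat) :
    ∀ (l cur : List Char) (acc : List (List Char)), l.length < fuel →
    PySem.Chars.splitOn.go ['\n'] fuel l cur acc
      = acc.reverse ++ (pvSplitNL l).modifyHead (cur.reverse ++ ·) := by
  induction fuel with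
  | zero => intro l cur acc h; omega
  | succ f ih =>
    intro l cur acc h
    cases l with
    | nil => simp [PySem.Chars.splitOn.go, pvSplitNL]
    | cons c r =>
      rw [PySem.Chars.splitOn.go]
      by_cases hc : c = '\n'
      · have hpre : List.isPrefixOf ['\n'] (c :: r) = true := by
          simp [List.isPrefixOf, hc]
        rw [if_pos hpre]
        have hr : r.length < f := by simpa using h
        rw [show List.drop (['\n'].length) (c :: r) = r by simp]
        rw [ih r [] (cur.reverse :: acc) hr]
        have hcc : (c == '\n') = true := by simp [hc]
        cases hsp : pvSplitNL r with
        | nil => exact absurd hsp (pvSplitNL_ne_nil r)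
        | cons x xs => simp [pvSplitNL, hcc, hsp]
      · have hpre : List.isPrefixOf ['\n'] (c :: r) = false := by
          simp [List.isPrefixOf]; exact fun e => absurd e.symm hc
        rw [if_neg (by simp [hpre])]
        have hr : r.length < f := by simpa using h
        rw [ih r (c :: cur) acc hr]
        have hcc : (c == '\n') = false := by simp [hc]
        cases hsp : pvSplitNL r with
        | nil => exact absurd hsp (pvSplitNL_ne_nil r)
        | cons x xs => simp [pvSplitNL, hcc, hsp]

lemma pv_splitOn_eq (l : List Char) :
    PySem.Chars.splitOn l ['\n'] = pvSplitNL l := by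
  unfold PySem.Chars.splitOn
  rw [pv_go_spec (l.length + 1) l [] [] (by omega)]
  cases hsp : pvSplitNL l with
  | nil => exact absurd hsp (pvSplitNL_ne_nil l)
  | cons x xs => simp

lemma pvSplitNL_cons (l : List Char) :
    pvSplitNL l = l.takeWhile (· != '\n') :: (pvSplitNL l).tail := by
  induction l with
  | nil => rfl
  | cons c r ih =>
    by_cases hc : c == '\n'
    · simp [pvSplitNL, hc, List.takeWhile_cons, bne]
    · cases hsp : pvSplitNL r with
      | nil => exact absurd hsp (pvSplitNL_ne_nil r)
      | cons x xs =>
        have hx : x = r.takeWhile (· != '\n') := by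
          rw [hsp] at ih; exact (List.cons.injEq _ _ _ _ ▸ ih).1
        simp [pvSplitNL, hc, hsp, List.takeWhile_cons, bne, hx]

lemma pv_join_cons_cons (sep a b : List Char) (r : List (List Char)) :
    PySem.Chars.join sep (a :: b :: r) = a ++ sep ++ PySem.Chars.join sep (b :: r) := by
  simp [PySem.Chars.join, List.intercalate, List.intersperse, List.append_assoc]

lemma pv_join_cons_head (sep : List Char) (c : Char) (y : List Char) (ys : List (List Char)) :
    PySem.Chars.join sep ((c :: y) :: ys) = c :: PySem.Chars.join sep (y :: ys) := by
  cases ys with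
  | nil => rfl
  | cons b r => rw [pv_join_cons_cons, pv_join_cons_cons]; simp

lemma pv_join_pvSplitNL (l : List Char) :
    PySem.Chars.join ['\n'] (pvSplitNL l) = l := by
  induction l with
  | nil => rfl
  | cons c r ih =>
    by_cases hc : c == '\n'
    · have hc' : c = '\n' := by simpa using hc
      cases hsp : pvSplitNL r with
      | nil => exact absurd hsp (pvSplitNL_ne_nil r)
      | cons x xs =>
        rw [hsp] at ih
        simp only [pvSplitNL, hc, if_true]
        rw [hsp, pv_join_cons_cons, ih, hc']
        rfl
    · cases hsp : pvSplitNL r with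
      | nil => exact absurd hsp (pvSplitNL_ne_nil r)
      | cons x xs =>
        rw [hsp] at ih
        simp only [pvSplitNL, hc, Bool.false_eq_true, if_false]
        rw [hsp, pv_join_cons_head, ih]

lemma pv_join_tail (l : List Char) :
    PySem.Chars.join ['\n'] ((pvSplitNL l).tail) = (l.dropWhile (· != '\n')).drop 1 := by
  induction l with
  | nil => rfl
  | cons c r ih =>
    by_cases hc : c == '\n'
    · simp only [pvSplitNL, hc, if_true, List.tail_cons]
      rw [pv_join_pvSplitNL]
      have : ((c :: r).dropWhile (· != '\n')) = c :: r := by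
        rw [List.dropWhile_cons]; simp [bne, hc]
      rw [this]; rfl
    · cases hsp : pvSplitNL r with
      | nil => exact absurd hsp (pvSplitNL_ne_nil r)
      | cons x xs =>
        rw [hsp] at ih
        simp only [pvSplitNL, hc, Bool.false_eq_true, if_false]
        rw [hsp]
        have : ((c :: r).dropWhile (· != '\n')) = r.dropWhile (· != '\n') := by
          rw [List.dropWhile_cons]; simp [bne, hc]
        rw [this, ← ih]
        rfl

-- ===== VERDICT (by name: the statement is the Claim_ definition above) =====
theorem parse_article_text_py_spec : Claim_equal_parse_article_text_py := by
  intro t _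
  unfold Spec_parse_article_text_py parse_article_text_py parse_article_text_py_alt
  rcases pv_strip_shape t.toList with h | ⟨c, m, h, hc⟩
  · simp only [h]
    decide
  · have hc' : (c != '\n') = true := by
      cases e : c == '\n'
      · simp [bne, e]
      · have he : c = '\n' := by simpa using e
        rw [he] at hc; exact absurd hc (by decide)
    simp only [h, pv_splitOn_eq]
    rw [pvSplitNL_cons (c :: m)]
    have hl0tw : (c :: m).takeWhile (· != '\n') = c :: m.takeWhile (· != '\n') := by
      simp [List.takeWhile_cons, hc']
    have hstrip : PySem.Chars.strip ((c :: m).takeWhile (· != '\n'))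
        = PySem.Chars.rstrip ((c :: m).takeWhile (· != '\n')) := by
      show PySem.Chars.rstrip (PySem.Chars.lstrip _) = _
      rw [hl0tw, pv_lstrip_cons, if_neg (by simp [hc])]
    have hne : PySem.Chars.strip ((c :: m).takeWhile (· != '\n')) ≠ [] := by
      rw [hstrip, hl0tw, pv_rstrip_cons]
      split_ifs with h1 h2
      · exact absurd h2 (by simp [hc])
      · simp
      · simp
    simp only [pvLoopA]
    rw [if_pos hne]
    simp only [Option.getD_some]
    rw [show ((0 + 1 : Nat) : Int) = ((1 : Nat) : Int) by norm_num]
    rw [PySem.List.slice_from_natCast]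
    rw [show List.drop 1 (((c :: m).takeWhile (· != '\n')) :: (pvSplitNL (c :: m)).tail)
          = (pvSplitNL (c :: m)).tail from rfl]
    rw [pv_join_tail]
    rw [hstrip]
    unfold pvLstripHashA
    rw [pv_title_eq]
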